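-- pv_equiv track=rewrite | github.com/mohammedbelgoumri/pfe-report | assets/scripts/corrupt.py | get_corrupted_sentences
-- ===== SOURCE A (Python) =====
-- from itertools import product
--
-- def get_corrupted_sentences(corpus, errors):
--     result = {}
--     for sentence in corpus:
--         variants = []
--         corruptable_words = [
--             word
--             for word in errors  # The keys of the errors dictionary
--             if word in sentence.split(" ")  # Only those in the sentence
--         ]
--         corruptions = list(
--             product(  # Cartesian product of all possible corruptions
--                 *[
--                     [(word, word)]  # Identity corruption
--                     + [
--                         (word, error) for error in errors[word]
--                     ]  # Modification corruptions
--                     for word in corruptable_words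
--                 ]
--             )
--         )
--         for corruption in corruptions:
--             splt = sentence.split(" ")
--             for word, error in corruption:
--                 splt[splt.index(word)] = error
--             if splt != sentence.split():
--                 variants.append(" ".join(splt))
--         result[sentence] = set(variants)
--     return result
-- ===== SOURCE B (Python) =====
-- def _replace_first(p, w, e):
--     q = list(p)
--     q[q.index(w)] = e
--     return q
--
-- def get_corrupted_sentences(corpus, errors):
--     result = {}
--     for sentence in corpus:
--         words = sentence.split(" ")
--         partials = [words]
--         for w in errors:
--             if w in words:
--                 new_partials = []
--                 for p in partials:
--                     new_partials.append(p)
--                     for e in errors[w]: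
--                         new_partials.append(_replace_first(p, w, e))
--                 partials = new_partials
--         base = sentence.split()
--         result[sentence] = {" ".join(p) for p in partials if p != base}
--     return result
-- ===== Notes on version B (the rewrite author's own statement) =====
-- stated objective: alternative
-- what changed: Replaces itertools.product over per-word option lists plus re-applying every corruption tuple to a fresh split from scratch by a word-by-word frontier expansion that grows partial sentences incrementally (each partial kept plus one copy per error), preserving order and the first-occurrence .index replacement semantics exactly.
import Mathlib
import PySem

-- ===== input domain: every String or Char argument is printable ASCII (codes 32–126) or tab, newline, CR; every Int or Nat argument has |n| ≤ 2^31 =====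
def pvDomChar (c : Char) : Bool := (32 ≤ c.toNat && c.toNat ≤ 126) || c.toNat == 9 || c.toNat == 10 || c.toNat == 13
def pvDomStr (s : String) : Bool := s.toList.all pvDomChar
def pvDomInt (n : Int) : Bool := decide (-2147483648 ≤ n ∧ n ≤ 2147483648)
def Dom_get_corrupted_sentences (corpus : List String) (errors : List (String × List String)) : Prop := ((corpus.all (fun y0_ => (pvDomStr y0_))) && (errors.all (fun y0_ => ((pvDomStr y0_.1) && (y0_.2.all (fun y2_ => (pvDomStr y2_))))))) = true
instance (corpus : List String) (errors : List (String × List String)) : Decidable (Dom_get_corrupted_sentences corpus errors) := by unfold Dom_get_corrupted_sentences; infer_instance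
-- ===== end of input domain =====

-- B replaces itertools.product + re-applying each corruption tuple from scratch by a word-by-word
-- frontier expansion of partial sentences (objective: alternative decomposition, same exact output).

-- ===== PORT A =====
-- sentence.split(" ") (separator is non-empty, so split? is always some)
def pvSplitSp (s : String) : List String := (PySem.Str.split? s " ").getD []

-- splt[splt.index(w)] = e  — shared by both ports (both Pythons perform this exact operation).
-- The none branch is unreachable at every call site (w is always present in p); Python would raise ValueError there.
def pvReplace (p : List String) (w e : String) : List String :=
  match PySem.List.index? p w with
  | some i => p.set i e
  | none => p

-- itertools.product(*os): tuples in lexicographic order, last factor fastest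
def pvProduct (os : List (List (String × String))) : List (List (String × String)) :=
  match os with
  | [] => [[]]
  | o :: rest => o.flatMap (fun x => (pvProduct rest).map (fun c => x :: c))

-- the per-sentence body of A's outer loop: the `variants` list
def pvVariantsA (errors : List (String × List String)) (sentence : String) : List String :=
  let corruptable_words := ((PySem.Dict.mk errors).keys).filter (fun w => w ∈ pvSplitSp sentence)
  let corruptions := pvProduct (corruptable_words.map (fun w =>
      (w, w) :: ((PySem.Dict.mk errors).getD w []).map (fun e => (w, e))))
  corruptions.foldl (fun variants c =>
    let splt := c.foldl (fun p we => pvReplace p we.1 we.2) (pvSplitSp sentence)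
    if splt != PySem.Str.split₀ sentence then variants ++ [PySem.Str.join " " splt]
    else variants) []

def get_corrupted_sentences (corpus : List String) (errors : List (String × List String)) : List (String × List String) :=
  (corpus.foldl (fun result sentence =>
      result.insert sentence (PySem.Set.ofList (pvVariantsA errors sentence)))
    PySem.Dict.empty).items

-- ===== PORT B =====
-- one partial p expanded at word w: p itself plus one copy per error (Source B's inner two appends)
def pvExpand (p : List String) (w : String) (errs : List String) : List (List String) :=
  p :: errs.map (fun e => pvReplace p w e)

-- the frontier of partial sentences after scanning all error words (Source B's `partials`)
def pvPartialsB (errors : List (String × List String)) (sentence : String) : List (List String) :=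
  let words := pvSplitSp sentence
  ((PySem.Dict.mk errors).keys).foldl (fun ps w =>
      if w ∈ words then ps.flatMap (fun p => pvExpand p w ((PySem.Dict.mk errors).getD w []))
      else ps)
    [words]

def get_corrupted_sentences_alt (corpus : List String) (errors : List (String × List String)) : List (String × List String) :=
  (corpus.foldl (fun result sentence =>
      result.insert sentence (PySem.Set.ofList
        (((pvPartialsB errors sentence).filter (fun p => p != PySem.Str.split₀ sentence)).map
          (fun p => PySem.Str.join " " p))))
    PySem.Dict.empty).items

-- ===== PRECONDITION & SPEC =====
def Spec_get_corrupted_sentences (corpus : List String) (errors : List (String × List String)) (out : List (String × List String)) : Prop := out = get_corrupted_sentences_alt corpus errors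
instance (corpus : List String) (errors : List (String × List String)) (out : List (String × List String)) : Decidable (Spec_get_corrupted_sentences corpus errors out) := by unfold Spec_get_corrupted_sentences; infer_instance

-- ===== CLAIM (what is proved, stated in full; the proofs are below) =====
def Claim_equal_get_corrupted_sentences : Prop := ∀ (corpus : List String) (errors : List (String × List String)), Dom_get_corrupted_sentences corpus errors → Spec_get_corrupted_sentences corpus errors (get_corrupted_sentences corpus errors)

-- ===== LEMMAS AND PROOFS =====

-- replacing the first occurrence of w by w itself is a no-op
theorem pvReplace_self (p : List String) (w : String) : pvReplace p w w = p := by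
  unfold pvReplace
  cases h : PySem.List.index? p w with
  | none => rfl
  | some i =>
    obtain ⟨hk, hv, -⟩ := PySem.List.getElem_of_index?_eq_some h
    rw [← hv]
    exact List.set_getElem_self hk

-- expanding one partial at word w is exactly mapping the replacement over A's option list for w
theorem pvExpand_eq (p : List String) (w : String) (errs : List String) :
    pvExpand p w errs
      = ((w, w) :: errs.map (fun e => (w, e))).map (fun we => pvReplace p we.1 we.2) := by
  simp [pvExpand, List.map_map, pvReplace_self]

-- frontier expansion word by word computes the cartesian product of the per-word option lists
-- mapped through the sequential replacement fold
theorem pvProduct_fold (opts : String → List (String × String)) (ws : List String)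
    (ps : List (List String)) :
    ws.foldl (fun ps w => ps.flatMap (fun p => (opts w).map (fun we => pvReplace p we.1 we.2))) ps
      = ps.flatMap (fun p => (pvProduct (ws.map opts)).map
          (fun c => c.foldl (fun q we => pvReplace q we.1 we.2) p)) := by
  induction ws generalizing ps with
  | nil => simp [pvProduct, List.flatMap_singleton']
  | cons w rest ih =>
    rw [List.foldl_cons, ih]
    simp [pvProduct, List.flatMap_assoc, List.map_flatMap, List.flatMap_map, List.map_map,
      Function.comp_def]

-- B's frontier is A's corruption list applied tuple-by-tuple
theorem pvPartialsB_eq (errors : List (String × List String)) (sentence : String) :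
    pvPartialsB errors sentence
      = (pvProduct ((((PySem.Dict.mk errors).keys).filter (fun w => w ∈ pvSplitSp sentence)).map
            (fun w => (w, w) :: ((PySem.Dict.mk errors).getD w []).map (fun e => (w, e))))).map
          (fun c => c.foldl (fun q we => pvReplace q we.1 we.2) (pvSplitSp sentence)) := by
  show ((PySem.Dict.mk errors).keys).foldl (fun ps w =>
      if w ∈ pvSplitSp sentence then
        ps.flatMap (fun p => pvExpand p w ((PySem.Dict.mk errors).getD w []))
      else ps) [pvSplitSp sentence] = _
  rw [show (fun (ps : List (List String)) (w : String) =>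
        if w ∈ pvSplitSp sentence then
          ps.flatMap (fun p => pvExpand p w ((PySem.Dict.mk errors).getD w []))
        else ps) =
      (fun ps w => if (fun w => decide (w ∈ pvSplitSp sentence)) w = true then
          ps.flatMap (fun p => pvExpand p w ((PySem.Dict.mk errors).getD w []))
        else ps) from funext fun ps => funext fun w => by
          by_cases h : w ∈ pvSplitSp sentence <;> simp [h]]
  rw [← List.foldl_filter]
  simp only [pvExpand_eq]
  rw [pvProduct_fold (fun w => (w, w) :: ((PySem.Dict.mk errors).getD w []).map (fun e => (w, e)))]
  simp

-- the per-sentence values of the two implementations coincide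
theorem pvVariants_eq (errors : List (String × List String)) (sentence : String) :
    ((pvPartialsB errors sentence).filter (fun p => p != PySem.Str.split₀ sentence)).map
        (fun p => PySem.Str.join " " p)
      = pvVariantsA errors sentence := by
  unfold pvVariantsA
  rw [show (fun (variants : List String) (c : List (String × String)) =>
        let splt := c.foldl (fun p we => pvReplace p we.1 we.2) (pvSplitSp sentence)
        if splt != PySem.Str.split₀ sentence then variants ++ [PySem.Str.join " " splt]
        else variants) =
      (fun variants c =>
        if (fun c => (c.foldl (fun p we => pvReplace p we.1 we.2) (pvSplitSp sentence))
              != PySem.Str.split₀ sentence) c = true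
        then variants ++ [(fun c => PySem.Str.join " "
              (c.foldl (fun p we => pvReplace p we.1 we.2) (pvSplitSp sentence))) c]
        else variants) from rfl]
  rw [PySem.List.foldl_append_if, pvPartialsB_eq, List.filter_map, List.map_map]
  simp [Function.comp_def]

-- ===== VERDICT (by name: the statement is the Claim_ definition above) =====
theorem get_corrupted_sentences_spec : Claim_equal_get_corrupted_sentences := by
  intro corpus errors _
  unfold Spec_get_corrupted_sentences get_corrupted_sentences get_corrupted_sentences_alt
  simp only [pvVariants_eq]
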